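-- pv_equiv track=rewrite | github.com/v0idhrt/pythonPrac | prac_3_5.py | restore_access_control
-- ===== SOURCE A (Python) =====
-- def restore_access_control(num_files, file_permissions, num_requests, requests):
--     permissions = {}
--
--     for entry in file_permissions:
--         parts = entry.split()
--         filename = parts[0]
--         ops = set(parts[1:])
--         permissions[filename] = ops
--
--     results = []
--     for request in requests:
--         operation, filename = request.split()
--         if filename in permissions and operation in permissions[filename]:
--             results.append("OK")
--         else:
--             results.append("Access denied")
--
--     return results
-- ===== SOURCE B (Python) =====
-- def _split_entry(entry):
--     parts = entry.split()
--     return (parts[0], parts[1:])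
--
--
-- def _check(table, request):
--     operation, filename = request.split()
--     for name, ops in reversed(table):
--         if name == filename:
--             return "OK" if operation in ops else "Access denied"
--     return "Access denied"
--
--
-- def restore_access_control(num_files, file_permissions, num_requests, requests):
--     table = [_split_entry(e) for e in file_permissions]
--     return [_check(table, r) for r in requests]
-- ===== Notes on version B (the rewrite author's own statement) =====
-- stated objective: alternative
-- what changed: Replaces the filename-keyed dict of op-sets with a plain list of (filename, ops) pairs scanned in reverse for the last matching entry per request.
import Mathlib
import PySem

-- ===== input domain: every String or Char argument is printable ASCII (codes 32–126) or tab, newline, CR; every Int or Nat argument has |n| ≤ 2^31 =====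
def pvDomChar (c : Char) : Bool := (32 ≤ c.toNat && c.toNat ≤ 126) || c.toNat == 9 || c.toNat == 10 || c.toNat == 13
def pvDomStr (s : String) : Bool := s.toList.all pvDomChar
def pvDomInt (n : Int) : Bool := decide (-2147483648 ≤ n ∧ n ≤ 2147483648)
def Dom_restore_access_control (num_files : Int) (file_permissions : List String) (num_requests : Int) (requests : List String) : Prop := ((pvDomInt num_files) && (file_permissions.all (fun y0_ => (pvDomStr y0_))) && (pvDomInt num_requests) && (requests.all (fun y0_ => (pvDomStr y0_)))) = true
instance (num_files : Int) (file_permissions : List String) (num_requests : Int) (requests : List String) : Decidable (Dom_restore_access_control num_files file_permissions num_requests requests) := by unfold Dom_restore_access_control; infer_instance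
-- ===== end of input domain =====

-- ===== PORT A =====
-- B changes the data structure: a plain (filename, ops-list) table scanned in reverse
-- instead of A's dict of op-sets; same output, same exception points (malformed lines excluded by Pre_).

-- loop body of A's first loop: permissions[parts[0]] = set(parts[1:])
def racStep (d : PySem.Dict String (PySem.Set String)) (entry : String) : PySem.Dict String (PySem.Set String) :=
  let parts := PySem.Str.split₀ entry
  let filename := (PySem.List.pyGet? parts 0).getD ""   -- parts[0]; Pre_ guarantees parts ≠ []
  let ops := PySem.Set.ofList (PySem.List.slice parts (some 1) none)
  d.insert filename ops

def restore_access_control (num_files : Int) (file_permissions : List String) (num_requests : Int) (requests : List String) : List String :=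
  let permissions := file_permissions.foldl racStep PySem.Dict.empty
  requests.foldl (fun results request =>
    -- operation, filename = request.split(); Pre_ guarantees exactly two words (else Python raises ValueError)
    let parts := PySem.Str.split₀ request
    let operation := (PySem.List.pyGet? parts 0).getD ""
    let filename := (PySem.List.pyGet? parts 1).getD ""
    results ++ [if permissions.contains filename &&
                   (permissions.getD filename PySem.Set.empty).contains operation
                then "OK" else "Access denied"]) []

-- ===== PORT B =====
-- _split_entry
def racSplitEntry (entry : String) : String × List String :=
  let parts := PySem.Str.split₀ entry
  ((PySem.List.pyGet? parts 0).getD "", PySem.List.slice parts (some 1) none)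

-- _check: scan reversed(table) for the first matching filename (break on hit)
def racCheck (table : List (String × List String)) (request : String) : String :=
  match PySem.Str.split₀ request with
  | operation :: filename :: _ =>
      match table.reverse.find? (fun p => p.1 == filename) with
      | some p => if p.2.contains operation then "OK" else "Access denied"
      | none => "Access denied"
  | _ => "Access denied"

def restore_access_control_alt (num_files : Int) (file_permissions : List String) (num_requests : Int) (requests : List String) : List String :=
  let table := file_permissions.map racSplitEntry
  requests.map (racCheck table)

-- ===== PRECONDITION & SPEC =====
-- Pre_ excludes exactly the inputs on which A raises: a permission line with no words
-- (IndexError on parts[0]) or a request not made of exactly two words (ValueError on unpacking).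
def Pre_restore_access_control (num_files : Int) (file_permissions : List String) (num_requests : Int) (requests : List String) : Prop :=
  (∀ e ∈ file_permissions, PySem.Str.split₀ e ≠ []) ∧
  (∀ r ∈ requests, (PySem.Str.split₀ r).length = 2)
instance (num_files : Int) (file_permissions : List String) (num_requests : Int) (requests : List String) : Decidable (Pre_restore_access_control num_files file_permissions num_requests requests) := by unfold Pre_restore_access_control; infer_instance

def pvWitness_restore_access_control : Int × List String × Int × List String :=
  (2, ["file1 read write", "file2 read", "file1 exec"], 3, ["read file1", "write file1", "exec file2"])

def Spec_restore_access_control (num_files : Int) (file_permissions : List String) (num_requests : Int) (requests : List String) (out : List String) : Prop := out = restore_access_control_alt num_files file_permissions num_requests requests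
instance (num_files : Int) (file_permissions : List String) (num_requests : Int) (requests : List String) (out : List String) : Decidable (Spec_restore_access_control num_files file_permissions num_requests requests out) := by unfold Spec_restore_access_control; infer_instance

-- ===== CLAIM (what is proved, stated in full; the proofs are below) =====
def Claim_equal_restore_access_control : Prop := ∀ (num_files : Int) (file_permissions : List String) (num_requests : Int) (requests : List String), Dom_restore_access_control num_files file_permissions num_requests requests → Pre_restore_access_control num_files file_permissions num_requests requests → Spec_restore_access_control num_files file_permissions num_requests requests (restore_access_control num_files file_permissions num_requests requests)

-- ===== LEMMAS AND PROOFS =====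

-- lookup in A's dict = last matching entry of B's table (first hit of the reversed table)
theorem racStep_eq (d : PySem.Dict String (PySem.Set String)) (e : String) :
    racStep d e = d.insert (racSplitEntry e).1 (PySem.Set.ofList (racSplitEntry e).2) := rfl

theorem rac_get?_foldl (fps : List String) (d : PySem.Dict String (PySem.Set String)) (k : String) :
    (fps.foldl racStep d).get? k =
      match (fps.map racSplitEntry).reverse.find? (fun p => p.1 == k) with
      | some p => some (PySem.Set.ofList p.2)
      | none => d.get? k := by
  induction fps generalizing d with
  | nil => simp
  | cons e rest ih =>
    simp only [List.foldl_cons, List.map_cons, List.reverse_cons, List.find?_append]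
    rw [ih]
    cases h : (rest.map racSplitEntry).reverse.find? (fun p => p.1 == k) with
    | some p => simp [h]
    | none =>
      rw [racStep_eq]
      by_cases hk : (racSplitEntry e).1 = k
      · subst hk
        simp [List.find?, PySem.Dict.get?_insert_self]
      · rw [PySem.Dict.get?_insert_of_ne _ _ (fun hh => hk hh.symm)]
        have hb : ((racSplitEntry e).1 == k) = false := beq_eq_false_iff_ne.mpr hk
        simp [List.find?, hb]

theorem rac_check_eq (fps : List String) (r : String)
    (hr : (PySem.Str.split₀ r).length = 2) :
    ((if (fps.foldl racStep PySem.Dict.empty).contains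
            ((PySem.List.pyGet? (PySem.Str.split₀ r) 1).getD "") &&
         ((fps.foldl racStep PySem.Dict.empty).getD
            ((PySem.List.pyGet? (PySem.Str.split₀ r) 1).getD "") PySem.Set.empty).contains
            ((PySem.List.pyGet? (PySem.Str.split₀ r) 0).getD "")
      then "OK" else "Access denied") : String) = racCheck (fps.map racSplitEntry) r := by
  match hs : PySem.Str.split₀ r with
  | [] | [_] | _ :: _ :: _ :: _ => simp [hs] at hr
  | [op, fn] =>
    simp only [racCheck, hs, PySem.List.pyGet?, PySem.List.pyIdx?]
    norm_num
    rw [PySem.Dict.contains_eq_isSome_get?, PySem.Dict.getD_eq_get?_getD, rac_get?_foldl]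
    cases h : (fps.map racSplitEntry).reverse.find? (fun p => p.1 == fn) with
    | none => simp
    | some p =>
      simp only [Option.isSome_some, Option.getD_some, Bool.true_and]
      congr 1
      simp [PySem.Set.contains]

-- ===== VERDICT (by name: the statement is the Claim_ definition above) =====
theorem restore_access_control_spec : Claim_equal_restore_access_control := by
  intro nf fps nr reqs _ hpre
  unfold Spec_restore_access_control restore_access_control restore_access_control_alt
  have key : ∀ rs : List String, (∀ r ∈ rs, (PySem.Str.split₀ r).length = 2) →
      ∀ acc : List String,
      (rs.foldl (fun results request =>
        results ++ [if (fps.foldl racStep PySem.Dict.empty).contains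
                          ((PySem.List.pyGet? (PySem.Str.split₀ request) 1).getD "") &&
                       ((fps.foldl racStep PySem.Dict.empty).getD
                          ((PySem.List.pyGet? (PySem.Str.split₀ request) 1).getD "") PySem.Set.empty).contains
                          ((PySem.List.pyGet? (PySem.Str.split₀ request) 0).getD "")
                    then "OK" else "Access denied"]) acc)
        = acc ++ rs.map (racCheck (fps.map racSplitEntry)) := by
    intro rs hrs
    induction rs with
    | nil => intro acc; simp
    | cons r rest ih =>
      intro acc
      have h2 := hrs r (List.mem_cons_self ..)
      simp only [List.foldl_cons, List.map_cons]
      rw [ih (fun x hx => hrs x (List.mem_cons_of_mem _ hx)), rac_check_eq fps r h2,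
          List.append_assoc, List.singleton_append]
  simpa using key reqs hpre.2 []
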